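-- pv_equiv track=rewrite | github.com/tim0dd/medseg | src/main/medseg/tools/datasets/compute_class_imbalance.py | get_non_predefined_class_pixel_count
-- ===== SOURCE A (Python) =====
-- from typing import Tuple, List
--
-- def get_non_predefined_class_pixel_count(class_defs, img_pixel_count_data: List[dict]) -> dict:
--     """Calculate the pixel count of non-predefined classes in the dataset.
--
--     Args:
--         class_defs (List[dict]): List of dictionaries containing class definitions.
--         img_pixel_count_data (List[dict]): List of dictionaries containing pixel counts for each class.
--
--     Returns:
--         dict: Dictionary containing rogue pixel values and their counts.
--     """
--     predefined_pixel_values = {class_def['pixel_value'] for class_def in class_defs}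
--     non_predefined_pixel_count = {}
--
--     for img_data in img_pixel_count_data:
--         for pixel_value, count in img_data.items():
--             if pixel_value not in predefined_pixel_values:
--                 non_predefined_pixel_count[pixel_value] = non_predefined_pixel_count.get(pixel_value, 0) + count
--
--     return non_predefined_pixel_count
-- ===== SOURCE B (Python) =====
-- def get_non_predefined_class_pixel_count(class_defs, img_pixel_count_data):
--     """Key-major re-implementation: flatten all (pixel_value, count) pairs once,
--     then, for each rogue pixel value in order of first appearance, compute its
--     total by summing over the flat pair list (no running accumulator dict)."""
--     predefined = {class_def['pixel_value'] for class_def in class_defs}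
--     pairs = [pair for img_data in img_pixel_count_data for pair in img_data.items()]
--     result = {}
--     for pixel_value, _ in pairs:
--         if pixel_value not in predefined and pixel_value not in result:
--             result[pixel_value] = sum(c for pv, c in pairs if pv == pixel_value)
--     return result
-- ===== Notes on version B (the rewrite author's own statement) =====
-- stated objective: alternative
-- what changed: B is key-major instead of item-major: it flattens all (pixel_value,count) pairs into one list and, for each rogue pixel value at its first appearance, computes its total by a full summation scan over that list, instead of A's single pass that maintains a running accumulator dict; B trades A's O(n) accumulation for an O(n*k) scan-per-key.
import Mathlib
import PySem

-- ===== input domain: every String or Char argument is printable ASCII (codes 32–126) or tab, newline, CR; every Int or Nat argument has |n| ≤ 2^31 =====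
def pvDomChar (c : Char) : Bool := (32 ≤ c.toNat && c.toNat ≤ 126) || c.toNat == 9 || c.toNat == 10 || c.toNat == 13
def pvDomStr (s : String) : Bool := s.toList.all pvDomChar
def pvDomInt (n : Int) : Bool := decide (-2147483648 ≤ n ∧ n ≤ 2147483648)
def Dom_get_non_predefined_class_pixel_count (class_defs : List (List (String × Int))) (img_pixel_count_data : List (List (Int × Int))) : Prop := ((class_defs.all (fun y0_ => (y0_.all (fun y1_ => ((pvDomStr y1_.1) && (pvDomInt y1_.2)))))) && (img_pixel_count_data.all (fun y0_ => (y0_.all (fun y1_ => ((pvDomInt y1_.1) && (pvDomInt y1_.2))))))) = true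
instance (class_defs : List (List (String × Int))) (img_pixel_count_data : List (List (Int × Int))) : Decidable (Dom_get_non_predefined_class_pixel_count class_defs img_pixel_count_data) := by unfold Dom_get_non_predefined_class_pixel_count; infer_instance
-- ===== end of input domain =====

-- B is key-major: it flattens all (pixel_value, count) pairs and, per rogue pixel
-- value at first appearance, sums its counts by a full scan (no accumulator dict).

-- ===== PORT A =====
-- class_def['pixel_value'] : first-match lookup; `getD … 0` is only exact under
-- Pre_ (the key is present), which excludes the KeyError inputs.
def get_non_predefined_class_pixel_count (class_defs : List (List (String × Int))) (img_pixel_count_data : List (List (Int × Int))) : List (Int × Int) :=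
  let predefined_pixel_values : PySem.Set Int :=
    class_defs.foldl (fun s class_def => PySem.Set.add s ((PySem.Dict.mk class_def).getD "pixel_value" 0)) PySem.Set.empty
  let non_predefined_pixel_count : PySem.Dict Int Int :=
    img_pixel_count_data.foldl (fun acc img_data =>
      img_data.foldl (fun acc p =>
        if PySem.Set.contains predefined_pixel_values p.1 then acc
        else acc.insert p.1 (acc.getD p.1 0 + p.2)) acc) PySem.Dict.empty
  non_predefined_pixel_count.items

-- ===== PORT B =====
def get_non_predefined_class_pixel_count_alt (class_defs : List (List (String × Int))) (img_pixel_count_data : List (List (Int × Int))) : List (Int × Int) :=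
  let predefined : PySem.Set Int :=
    PySem.Set.ofList (class_defs.map (fun class_def => (PySem.Dict.mk class_def).getD "pixel_value" 0))
  let pairs : List (Int × Int) := img_pixel_count_data.flatMap (fun img_data => img_data)
  let result : PySem.Dict Int Int :=
    pairs.foldl (fun res p =>
      if !(PySem.Set.contains predefined p.1) && !(res.contains p.1) then
        res.insert p.1 ((pairs.filter (fun q => q.1 == p.1)).foldl (fun s q => s + q.2) 0)
      else res) PySem.Dict.empty
  result.items

-- ===== PRECONDITION & SPEC =====
-- Pre_ excludes exactly the inputs where class_def['pixel_value'] raises KeyError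
-- (some class_def lacks the key 'pixel_value'); B raises there as well.
def Pre_get_non_predefined_class_pixel_count (class_defs : List (List (String × Int))) (img_pixel_count_data : List (List (Int × Int))) : Prop :=
  (class_defs.all (fun class_def => class_def.any (fun kv => kv.1 == "pixel_value"))) = true
instance (class_defs : List (List (String × Int))) (img_pixel_count_data : List (List (Int × Int))) : Decidable (Pre_get_non_predefined_class_pixel_count class_defs img_pixel_count_data) := by unfold Pre_get_non_predefined_class_pixel_count; infer_instance

def pvWitness_get_non_predefined_class_pixel_count : (List (List (String × Int))) × (List (List (Int × Int))) :=
  ([[("pixel_value", 1)]], [[(1, 5), (2, 3)], [(2, 4)]])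

def Spec_get_non_predefined_class_pixel_count (class_defs : List (List (String × Int))) (img_pixel_count_data : List (List (Int × Int))) (out : List (Int × Int)) : Prop := out = get_non_predefined_class_pixel_count_alt class_defs img_pixel_count_data
instance (class_defs : List (List (String × Int))) (img_pixel_count_data : List (List (Int × Int))) (out : List (Int × Int)) : Decidable (Spec_get_non_predefined_class_pixel_count class_defs img_pixel_count_data out) := by unfold Spec_get_non_predefined_class_pixel_count; infer_instance

-- ===== CLAIM (what is proved, stated in full; the proofs are below) =====
def Claim_equal_get_non_predefined_class_pixel_count : Prop := ∀ (class_defs : List (List (String × Int))) (img_pixel_count_data : List (List (Int × Int))), Dom_get_non_predefined_class_pixel_count class_defs img_pixel_count_data → Pre_get_non_predefined_class_pixel_count class_defs img_pixel_count_data → Spec_get_non_predefined_class_pixel_count class_defs img_pixel_count_data (get_non_predefined_class_pixel_count class_defs img_pixel_count_data)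

-- ===== LEMMAS AND PROOFS =====

-- proof-only helpers: restriction of a dict to the keys `keep` accepts, and
-- re-valuation of every entry of a dict by a fixed per-key total T
def pvKeyFilter (keep : Int → Bool) (d : PySem.Dict Int Int) : PySem.Dict Int Int :=
  PySem.Dict.mk (d.items.filter (fun p => keep p.1))

def pvReval (T : Int → Int) (d : PySem.Dict Int Int) : PySem.Dict Int Int :=
  PySem.Dict.mk (d.items.map (fun p => (p.1, T p.1)))

theorem pvFilterMapComm (keep : Int → Bool) (k v : Int) (l : List (Int × Int)) :
    (l.map (fun p => if p.1 == k then (k, v) else p)).filter (fun p => keep p.1)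
      = (l.filter (fun p => keep p.1)).map (fun p => if p.1 == k then (k, v) else p) := by
  induction l with
  | nil => rfl
  | cons p t ih =>
    by_cases hq : keep p.1 = true
    · have hq' : keep (if p.1 == k then (k, v) else p).1 = true := by
        by_cases hpk : p.1 = k
        · simpa [hpk] using hpk ▸ hq
        · simpa [hpk] using hq
      simp only [List.map_cons, List.filter_cons, hq', hq, if_pos, ih]
    · have hq' : keep (if p.1 == k then (k, v) else p).1 = false := by
        by_cases hpk : p.1 = k
        · simpa [hpk] using Bool.not_eq_true _ ▸ (hpk ▸ hq)
        · simpa [hpk] using Bool.not_eq_true _ ▸ hq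
      simp only [List.map_cons, List.filter_cons, hq', Bool.not_eq_true _ ▸ hq,
        Bool.false_eq_true, if_false, ih]

theorem pvAnyFilter (keep : Int → Bool) (k : Int) (l : List (Int × Int)) (hk : keep k = true) :
    ((l.filter (fun p => keep p.1)).any fun p => p.1 == k) = (l.any fun p => p.1 == k) := by
  rcases h : l.any fun p => p.1 == k with _ | _
  · rw [List.any_eq_false] at h ⊢
    intro p hp
    exact h p (List.mem_filter.mp hp).1
  · rw [List.any_eq_true] at h ⊢
    obtain ⟨p, hp, hpk⟩ := h
    have hpk' : p.1 = k := by simpa using hpk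
    exact ⟨p, List.mem_filter.mpr ⟨hp, by rw [hpk']; exact hk⟩, hpk⟩

theorem pvAnyFilterFalse (keep : Int → Bool) (k : Int) (l : List (Int × Int))
    (hc : (l.any fun p => p.1 == k) = false) :
    ((l.filter (fun p => keep p.1)).any fun p => p.1 == k) = false := by
  rw [List.any_eq_false] at hc ⊢
  intro p hp
  exact hc p (List.mem_filter.mp hp).1

theorem pvKeyFilter_insert (keep : Int → Bool) (d : PySem.Dict Int Int) (k : Int) (v : Int) :
    pvKeyFilter keep (d.insert k v)
      = if keep k then (pvKeyFilter keep d).insert k v else pvKeyFilter keep d := by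
  apply PySem.Dict.ext
  simp only [pvKeyFilter, PySem.Dict.insert, PySem.Dict.contains]
  by_cases hc : (d.items.any fun p => p.1 == k) = true
  · by_cases hk : keep k = true
    · rw [if_pos hk]
      simp only [hc, if_pos, pvAnyFilter keep k d.items hk]
      exact pvFilterMapComm keep k v d.items
    · rw [if_neg hk]
      simp only [hc, if_pos]
      rw [pvFilterMapComm keep k v d.items]
      have : ∀ p ∈ d.items.filter (fun p => keep p.1),
          (fun p => if p.1 == k then (k, v) else p) p = id p := by
        intro p hp
        have hkeep := (List.mem_filter.mp hp).2
        have hne : p.1 ≠ k := fun h => hk (h ▸ hkeep)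
        simp [hne]
      rw [List.map_congr_left this, List.map_id]
  · rw [Bool.not_eq_true] at hc
    by_cases hk : keep k = true
    · rw [if_pos hk]
      simp only [hc, Bool.false_eq_true, if_neg, not_false_iff,
        pvAnyFilterFalse keep k d.items hc]
      rw [List.filter_append, List.filter_cons_of_pos (by simpa using hk)]
      rfl
    · rw [if_neg hk]
      simp only [hc, Bool.false_eq_true, if_neg, not_false_iff]
      rw [List.filter_append, List.filter_cons_of_neg (by simpa using hk)]
      simp

theorem pvContains_reval (T : Int → Int) (d : PySem.Dict Int Int) (k : Int) :
    (pvReval T d).contains k = d.contains k := by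
  simp only [pvReval, PySem.Dict.contains, List.any_map]
  rfl

theorem pvReval_insert_contains (T : Int → Int) (d : PySem.Dict Int Int) (k v : Int)
    (hc : d.contains k = true) : pvReval T (d.insert k v) = pvReval T d := by
  apply PySem.Dict.ext
  simp only [pvReval, PySem.Dict.items_insert_of_contains _ _ hc, List.map_map]
  refine List.map_congr_left ?_
  intro p _
  by_cases hpk : p.1 = k
  · simp [Function.comp, hpk]
  · simp [Function.comp, hpk]

theorem pvReval_insert_not_contains (T : Int → Int) (d : PySem.Dict Int Int) (k v : Int)
    (hc : d.contains k = false) :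
    pvReval T (d.insert k v) = (pvReval T d).insert k (T k) := by
  apply PySem.Dict.ext
  have hc' : (pvReval T d).contains k = false := by rw [pvContains_reval]; exact hc
  rw [PySem.Dict.items_insert_of_not_contains _ _ hc']
  simp only [pvReval, PySem.Dict.items_insert_of_not_contains _ _ hc, List.map_append,
    List.map_cons, List.map_nil]

-- one step of B's loop, against the filtered-and-revalued accumulator
theorem pvBStep (c : Int → Bool) (T : Int → Int) (d : PySem.Dict Int Int) (p : Int × Int) :
    (if (!c p.1 && !((pvReval T (pvKeyFilter (fun x => !c x) d)).contains p.1)) = true then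
        (pvReval T (pvKeyFilter (fun x => !c x) d)).insert p.1 (T p.1)
      else pvReval T (pvKeyFilter (fun x => !c x) d))
      = pvReval T (pvKeyFilter (fun x => !c x) (d.insert p.1 (d.getD p.1 0 + p.2))) := by
  by_cases hc : c p.1 = true
  · have h2 := pvKeyFilter_insert (fun x => !c x) d p.1 (d.getD p.1 0 + p.2)
    rw [if_neg (by simp [hc])] at h2
    rw [h2, if_neg (by simp [hc])]
  · have hk : (!c p.1) = true := by simp [hc]
    have h2 := pvKeyFilter_insert (fun x => !c x) d p.1 (d.getD p.1 0 + p.2)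
    rw [if_pos hk] at h2
    rw [h2]
    by_cases hd : (pvKeyFilter (fun x => !c x) d).contains p.1 = true
    · rw [if_neg (by simp [pvContains_reval, hd, hc]),
        pvReval_insert_contains _ _ _ _ hd]
    · rw [Bool.not_eq_true] at hd
      rw [if_pos (by simp [pvContains_reval, hd, hc]),
        pvReval_insert_not_contains _ _ _ _ hd]

theorem pvBLoop (c : Int → Bool) (T : Int → Int) (v : List (Int × Int)) (d : PySem.Dict Int Int) :
    v.foldl (fun res p => if !c p.1 && !(res.contains p.1) then res.insert p.1 (T p.1) else res)
        (pvReval T (pvKeyFilter (fun x => !c x) d))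
      = pvReval T (pvKeyFilter (fun x => !c x)
          (v.foldl (fun acc p => acc.insert p.1 (acc.getD p.1 0 + p.2)) d)) := by
  induction v generalizing d with
  | nil => rfl
  | cons p t ih =>
    simp only [List.foldl_cons]
    rw [pvBStep c T d p, ih]

theorem pvFindFilter (keep : Int → Bool) (k : Int) (hk : keep k = true) (l : List (Int × Int)) :
    List.find? (fun p => p.1 == k) (l.filter (fun p => keep p.1))
      = List.find? (fun p => p.1 == k) l := by
  induction l with
  | nil => rfl
  | cons p t ih =>
    by_cases hpk : p.1 = k
    · simp [List.filter_cons, hpk, hk]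
    · by_cases hkp : keep p.1 = true
      · simp [hkp, hpk, ih]
      · simp [hkp, hpk, ih]

theorem pvKeyFilter_getD (keep : Int → Bool) (d : PySem.Dict Int Int) (k : Int)
    (hk : keep k = true) : (pvKeyFilter keep d).getD k 0 = d.getD k 0 := by
  simp only [pvKeyFilter, PySem.Dict.getD, PySem.Dict.get?]
  rw [pvFindFilter keep k hk]

-- nested accumulation over images = accumulation over the flattened pair list
-- A's filter-during nested loop equals the filtered plain accumulation (from the last proof)
theorem pvInnerLoop (c : Int → Bool) (l : List (Int × Int)) (d : PySem.Dict Int Int) :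
    l.foldl (fun acc p => if c p.1 then acc else acc.insert p.1 (acc.getD p.1 0 + p.2))
        (pvKeyFilter (fun x => !c x) d)
      = pvKeyFilter (fun x => !c x)
          (l.foldl (fun acc p => acc.insert p.1 (acc.getD p.1 0 + p.2)) d) := by
  induction l generalizing d with
  | nil => rfl
  | cons p t ih =>
    simp only [List.foldl_cons]
    by_cases hc : c p.1
    · have h2 := pvKeyFilter_insert (fun x => !c x) d p.1 (d.getD p.1 0 + p.2)
      rw [if_neg (by simp [hc])] at h2
      rw [if_pos hc, ← h2, ih]
    · have hk : (!c p.1) = true := by simp [hc]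
      have h2 := pvKeyFilter_insert (fun x => !c x) d p.1 (d.getD p.1 0 + p.2)
      rw [if_pos hk] at h2
      rw [if_neg hc, pvKeyFilter_getD _ _ _ hk, ← h2, ih]

theorem pvOuterLoop (c : Int → Bool) (ls : List (List (Int × Int))) (d : PySem.Dict Int Int) :
    ls.foldl (fun acc img =>
        img.foldl (fun acc p => if c p.1 then acc else acc.insert p.1 (acc.getD p.1 0 + p.2)) acc)
        (pvKeyFilter (fun x => !c x) d)
      = pvKeyFilter (fun x => !c x)
          (ls.foldl (fun acc img =>
            img.foldl (fun acc p => acc.insert p.1 (acc.getD p.1 0 + p.2)) acc) d) := by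
  induction ls generalizing d with
  | nil => rfl
  | cons img t ih => simp only [List.foldl_cons]; rw [pvInnerLoop, ih]

theorem pvFoldlFlat (ls : List (List (Int × Int))) (d : PySem.Dict Int Int) :
    ls.foldl (fun acc img => img.foldl (fun acc p => acc.insert p.1 (acc.getD p.1 0 + p.2)) acc) d
      = (ls.flatMap (fun img => img)).foldl
          (fun acc p => acc.insert p.1 (acc.getD p.1 0 + p.2)) d := by
  induction ls generalizing d with
  | nil => rfl
  | cons img t ih => simp only [List.foldl_cons, List.flatMap_cons, List.foldl_append, ih]

-- the value accumulated for a key is the total count of that key in the list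
theorem pvAccGetD (l : List (Int × Int)) (k : Int) :
    (l.foldl (fun acc p => acc.insert p.1 (acc.getD p.1 0 + p.2)) PySem.Dict.empty).getD k 0
      = (l.filter (fun q => q.1 == k)).foldl (fun s q => s + q.2) 0 := by
  induction l using List.reverseRecOn with
  | nil => rfl
  | append_singleton l p ih =>
    rw [List.foldl_append, List.foldl_cons, List.foldl_nil, List.filter_append,
      PySem.Dict.getD_insert]
    by_cases hpk : k = p.1
    · subst hpk
      rw [if_pos rfl, ih]
      simp [List.foldl_append]
    · rw [if_neg hpk, ih]
      have : p.1 ≠ k := fun h => hpk h.symm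
      simp [List.foldl_append, List.filter_cons, this]

theorem pvAccNodup (l : List (Int × Int)) :
    (l.foldl (fun acc p => acc.insert p.1 (acc.getD p.1 0 + p.2)) PySem.Dict.empty).keys.Nodup :=
  PySem.Dict.nodup_keys_foldl_insert_key l Prod.fst _ _ PySem.Dict.nodup_keys_empty

-- every surviving entry already carries its total, so revaluing is the identity there
theorem pvRevalFilterAcc (keep : Int → Bool) (l : List (Int × Int)) :
    pvReval (fun k => (l.filter (fun q => q.1 == k)).foldl (fun s q => s + q.2) 0)
        (pvKeyFilter keep (l.foldl (fun acc p => acc.insert p.1 (acc.getD p.1 0 + p.2)) PySem.Dict.empty))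
      = pvKeyFilter keep (l.foldl (fun acc p => acc.insert p.1 (acc.getD p.1 0 + p.2)) PySem.Dict.empty) := by
  apply PySem.Dict.ext
  simp only [pvReval, pvKeyFilter]
  refine (List.map_congr_left ?_).trans (List.map_id _)
  intro p hp
  have hpd : p ∈ (l.foldl (fun acc p => acc.insert p.1 (acc.getD p.1 0 + p.2)) PySem.Dict.empty).items :=
    (List.mem_filter.mp hp).1
  have hv : (l.foldl (fun acc p => acc.insert p.1 (acc.getD p.1 0 + p.2)) PySem.Dict.empty).getD p.1 0 = p.2 :=
    PySem.Dict.getD_of_mem_items _ hpd (pvAccNodup l) 0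
  show (p.1, (l.filter (fun q => q.1 == p.1)).foldl (fun s q => s + q.2) 0) = id p
  rw [← pvAccGetD l p.1, hv]
  rfl

theorem pvMainDict (c : Int → Bool) (ls : List (List (Int × Int))) :
    ls.foldl (fun acc img =>
        img.foldl (fun acc p => if c p.1 then acc else acc.insert p.1 (acc.getD p.1 0 + p.2)) acc)
        PySem.Dict.empty
      = (ls.flatMap (fun img => img)).foldl (fun res p =>
          if !c p.1 && !(res.contains p.1) then
            res.insert p.1
              (((ls.flatMap (fun img => img)).filter (fun q => q.1 == p.1)).foldl
                (fun s q => s + q.2) 0)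
          else res) PySem.Dict.empty := by
  have hA := pvOuterLoop c ls PySem.Dict.empty
  rw [show pvKeyFilter (fun x => !c x) PySem.Dict.empty = PySem.Dict.empty from rfl] at hA
  have hB := pvBLoop c
      (fun k => ((ls.flatMap (fun img => img)).filter (fun q => q.1 == k)).foldl
        (fun s q => s + q.2) 0)
      (ls.flatMap (fun img => img)) PySem.Dict.empty
  rw [show pvReval (fun k => ((ls.flatMap (fun img => img)).filter (fun q => q.1 == k)).foldl
        (fun s q => s + q.2) 0) (pvKeyFilter (fun x => !c x) PySem.Dict.empty)
      = PySem.Dict.empty from rfl] at hB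
  rw [hA, pvFoldlFlat]
  exact (hB.trans (pvRevalFilterAcc (fun x => !c x) _)).symm

-- ===== VERDICT (by name: the statement is the Claim_ definition above) =====
theorem get_non_predefined_class_pixel_count_spec : Claim_equal_get_non_predefined_class_pixel_count := by
  intro class_defs img_pixel_count_data _ _
  unfold Spec_get_non_predefined_class_pixel_count
  unfold get_non_predefined_class_pixel_count get_non_predefined_class_pixel_count_alt
  have hset : (class_defs.foldl (fun s class_def => PySem.Set.add s ((PySem.Dict.mk class_def).getD "pixel_value" 0)) PySem.Set.empty)
      = PySem.Set.ofList (class_defs.map (fun class_def => (PySem.Dict.mk class_def).getD "pixel_value" 0)) := by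
    rw [PySem.Set.ofList_eq_foldl, List.foldl_map]
    rfl
  simp only [hset]
  exact congrArg PySem.Dict.items
    (pvMainDict (fun x => PySem.Set.contains
        (PySem.Set.ofList (class_defs.map (fun class_def => (PySem.Dict.mk class_def).getD "pixel_value" 0))) x)
      img_pixel_count_data)
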